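-- pv_equiv track=rewrite | github.com/moyueheng/Intelligent-Underwriting-System | server/apps/database/utils.py | kie_post_process
-- ===== SOURCE A (Python) =====
-- def kie_post_process(kie_result):
--     kie_information = {}
--     for question, answer in kie_result:
--         if kie_information.get(question['transcription'], None):
--             kie_information[question['transcription']] += answer['transcription']
--         else:
--             kie_information[question['transcription']] = answer['transcription']
--     return kie_information
-- ===== SOURCE B (Python) =====
-- def kie_post_process(kie_result):
--     # Group by question transcription: first-occurrence key order, then one
--     # join per key over the rows that carry it.
--     keys = list(dict.fromkeys(q['transcription'] for q, a in kie_result))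
--     return {
--         k: ''.join(a['transcription'] for q, a in kie_result if q['transcription'] == k)
--         for k in keys
--     }
-- ===== Notes on version B (the rewrite author's own statement) =====
-- stated objective: alternative
-- what changed: Replaces A's streaming dict accumulator (truthy get, then += or assign per row) by a two-phase grouping: collect first-occurrence-ordered distinct keys, then build each value with one ''.join over the rows matching that key.
import Mathlib
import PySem

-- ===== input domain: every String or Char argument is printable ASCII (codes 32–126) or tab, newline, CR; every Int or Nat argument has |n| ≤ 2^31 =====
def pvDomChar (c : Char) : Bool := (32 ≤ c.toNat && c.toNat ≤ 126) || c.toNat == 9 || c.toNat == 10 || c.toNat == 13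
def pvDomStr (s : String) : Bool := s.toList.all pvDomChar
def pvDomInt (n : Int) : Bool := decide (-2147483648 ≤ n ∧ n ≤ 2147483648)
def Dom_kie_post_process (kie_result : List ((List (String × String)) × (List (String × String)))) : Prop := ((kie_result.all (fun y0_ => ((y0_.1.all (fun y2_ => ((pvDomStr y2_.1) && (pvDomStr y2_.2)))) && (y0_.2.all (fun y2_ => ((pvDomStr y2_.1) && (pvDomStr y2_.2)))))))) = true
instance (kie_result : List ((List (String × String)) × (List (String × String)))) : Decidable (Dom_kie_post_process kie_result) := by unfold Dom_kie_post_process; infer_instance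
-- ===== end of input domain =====

-- B groups by distinct question keys and joins each group's answers in one pass,
-- instead of A's streaming dict accumulator; equal results, orders preserved.

-- ===== PORT A =====
-- d['transcription'] (first-match lookup in the assoc list); Python raises KeyError
-- when the key is absent — Pre_ excludes that, the port returns "" there.
def pvLookup (d : List (String × String)) : String :=
  ((PySem.Dict.mk d).get? "transcription").getD ""

def kie_post_process (kie_result : List ((List (String × String)) × (List (String × String)))) : List (String × String) :=
  (kie_result.foldl
    (fun info qa =>
      let k := pvLookup qa.1
      let a := pvLookup qa.2
      if ((info.get? k).getD "") ≠ "" then        -- if kie_information.get(k, None):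
        info.insert k (info.getD k "" ++ a)       --   kie_information[k] += a
      else
        info.insert k a)                          -- else: kie_information[k] = a
    PySem.Dict.empty).items

-- ===== PORT B =====
def kie_post_process_alt (kie_result : List ((List (String × String)) × (List (String × String)))) : List (String × String) :=
  let keys := PySem.List.dedup (kie_result.map (fun qa => pvLookup qa.1))
  keys.map (fun k =>
    (k, PySem.Str.join ""
          ((kie_result.filter (fun qa => pvLookup qa.1 == k)).map (fun qa => pvLookup qa.2))))

-- ===== PRECONDITION & SPEC =====
-- exactly the inputs where Python A returns: every question and answer dict has the key 'transcription'
def Pre_kie_post_process (kie_result : List ((List (String × String)) × (List (String × String)))) : Prop :=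
  (kie_result.all (fun qa =>
    (qa.1.any (fun p => p.1 == "transcription")) && (qa.2.any (fun p => p.1 == "transcription")))) = true
instance (kie_result : List ((List (String × String)) × (List (String × String)))) : Decidable (Pre_kie_post_process kie_result) := by unfold Pre_kie_post_process; infer_instance
def pvWitness_kie_post_process : (List ((List (String × String)) × (List (String × String)))) :=
  [([("transcription", "name")], [("transcription", "Ada")]),
   ([("transcription", "name")], [("transcription", " Lovelace")])]

def Spec_kie_post_process (kie_result : List ((List (String × String)) × (List (String × String)))) (out : List (String × String)) : Prop := out = kie_post_process_alt kie_result
instance (kie_result : List ((List (String × String)) × (List (String × String)))) (out : List (String × String)) : Decidable (Spec_kie_post_process kie_result out) := by unfold Spec_kie_post_process; infer_instance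

-- ===== CLAIM (what is proved, stated in full; the proofs are below) =====
def Claim_equal_kie_post_process : Prop := ∀ (kie_result : List ((List (String × String)) × (List (String × String)))), Dom_kie_post_process kie_result → Pre_kie_post_process kie_result → Spec_kie_post_process kie_result (kie_post_process kie_result)

-- ===== LEMMAS AND PROOFS =====

-- A's loop body always stores (current value, "" if absent) ++ answer:
-- the falsy branch covers both "key absent" (old value "") and "value empty" (""++a = a).
theorem pvStep_eq (info : PySem.Dict String String)
    (qa : (List (String × String)) × (List (String × String))) :
    (let k := pvLookup qa.1
     let a := pvLookup qa.2
     if ((info.get? k).getD "") ≠ "" then info.insert k (info.getD k "" ++ a)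
     else info.insert k a)
    = info.insert (pvLookup qa.1) (info.getD (pvLookup qa.1) "" ++ pvLookup qa.2) := by
  simp only [PySem.Dict.getD_eq_get?_getD]
  cases h : info.get? (pvLookup qa.1) with
  | none => simp [String.empty_append]
  | some v =>
    by_cases hv : v = "" <;> simp [hv, String.empty_append]

theorem pvJoin_cons (a : String) (l : List String) :
    PySem.Str.join "" (a :: l) = a ++ PySem.Str.join "" l := by
  cases l with
  | nil => simp [PySem.Str.join, String.append_empty]
  | cons b t => simp [PySem.Str.join, PySem.Chars.join_cons_cons]

theorem pvGetD_foldl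
    (l : List ((List (String × String)) × (List (String × String))))
    (d : PySem.Dict String String) (k : String) :
    (l.foldl (fun d qa => d.insert (pvLookup qa.1) (d.getD (pvLookup qa.1) "" ++ pvLookup qa.2)) d).getD k ""
      = d.getD k "" ++ PySem.Str.join ""
          ((l.filter (fun qa => pvLookup qa.1 == k)).map (fun qa => pvLookup qa.2)) := by
  induction l generalizing d with
  | nil => simp [PySem.Str.join, String.append_empty]
  | cons qa t ih =>
    simp only [List.foldl_cons, ih, List.filter_cons]
    by_cases hk : pvLookup qa.1 = k
    · simp [hk, pvJoin_cons, String.append_assoc]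
    · have : (pvLookup qa.1 == k) = false := by simp [hk]
      simp only [this, Bool.false_eq_true, if_false, PySem.Dict.getD_insert]
      rw [if_neg (fun h => hk h.symm)]

theorem pvFoldl_step_eq
    (l : List ((List (String × String)) × (List (String × String))))
    (d : PySem.Dict String String) :
    l.foldl (fun info qa =>
      let k := pvLookup qa.1
      let a := pvLookup qa.2
      if ((info.get? k).getD "") ≠ "" then info.insert k (info.getD k "" ++ a)
      else info.insert k a) d
    = l.foldl (fun d qa => d.insert (pvLookup qa.1) (d.getD (pvLookup qa.1) "" ++ pvLookup qa.2)) d := by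
  induction l generalizing d with
  | nil => rfl
  | cons qa t _ => simp only [List.foldl_cons, pvStep_eq]

-- ===== VERDICT (by name: the statement is the Claim_ definition above) =====
theorem kie_post_process_spec : Claim_equal_kie_post_process := by
  intro kie _ _
  unfold Spec_kie_post_process kie_post_process kie_post_process_alt
  rw [pvFoldl_step_eq]
  set K : (List (String × String)) × (List (String × String)) → String := fun qa => pvLookup qa.1 with hK
  have hnd : (kie.foldl (fun d qa => d.insert (pvLookup qa.1) (d.getD (pvLookup qa.1) "" ++ pvLookup qa.2)) PySem.Dict.empty).keys.Nodup := by
    exact PySem.Dict.nodup_keys_foldl_insert_key kie (fun qa => pvLookup qa.1) _ _ (by simp [PySem.Dict.keys_empty])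
  rw [PySem.Dict.items_eq_map_keys _ hnd ""]
  have hkeys : (kie.foldl (fun d qa => d.insert (pvLookup qa.1) (d.getD (pvLookup qa.1) "" ++ pvLookup qa.2)) PySem.Dict.empty).keys
      = PySem.List.dedup (kie.map (fun qa => pvLookup qa.1)) := by
    rw [PySem.Dict.keys_foldl_insert_key]
    simp [PySem.Dict.keys_empty, PySem.Set.update, PySem.List.dedup_eq_ofList, PySem.Set.ofList_eq_foldl]
  rw [hkeys]
  apply List.map_congr_left
  intro k _
  rw [pvGetD_foldl]
  simp [PySem.Dict.getD_empty, String.empty_append]
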